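-- pv_equiv track=rewrite | github.com/felescgon/best-epoch-selector | helpers/figure_helpers.py | __find_epoch_directory_index
-- ===== SOURCE A (Python) =====
-- def __find_epoch_directory_index(directories):
--     epoch_substring = "epoch"
--     epoch_index = None
--     for i in range(len(directories) - 1, -1, -1):
--         if directories[i].startswith(epoch_substring):
--             epoch_index = i
--             break
--     return epoch_index
-- ===== SOURCE B (Python) =====
-- def __find_epoch_directory_index(directories):
--     epoch_index = None
--     for i, name in enumerate(directories):
--         if name.startswith("epoch"):
--             epoch_index = i
--     return epoch_index
-- ===== Notes on version B (the rewrite author's own statement) =====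
-- stated objective: simpler
-- what changed: Replaces the reverse index scan with early exit by a single forward enumerate pass that keeps the last matching index.
import Mathlib
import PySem

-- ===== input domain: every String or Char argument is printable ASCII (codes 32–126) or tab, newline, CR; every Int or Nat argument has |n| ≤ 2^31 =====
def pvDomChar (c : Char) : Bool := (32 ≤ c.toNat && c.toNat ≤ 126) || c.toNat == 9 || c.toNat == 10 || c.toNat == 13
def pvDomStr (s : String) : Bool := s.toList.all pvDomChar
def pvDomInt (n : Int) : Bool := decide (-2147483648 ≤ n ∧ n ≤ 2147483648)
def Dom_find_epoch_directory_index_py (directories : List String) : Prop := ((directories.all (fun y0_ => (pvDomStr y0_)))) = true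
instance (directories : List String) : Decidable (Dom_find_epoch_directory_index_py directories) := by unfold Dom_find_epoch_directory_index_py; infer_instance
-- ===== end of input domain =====

-- B replaces A's reverse scan with early exit by one forward enumerate pass keeping the last match (objective: simpler).
-- ===== PORT A =====
-- the for-loop over range(len-1, -1, -1) with break: count down from k, stop at the first match
def find_epoch_loopA (directories : List String) : Nat → Option Int
  | 0 => none
  | k + 1 =>
    if PySem.Str.startswith (directories.getD k "") "epoch" then some (k : Int)
    else find_epoch_loopA directories k

def find_epoch_directory_index_py (directories : List String) : Option Int :=
  find_epoch_loopA directories directories.length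

-- ===== PORT B =====
def find_epoch_directory_index_py_alt (directories : List String) : Option Int :=
  (PySem.List.enumerate directories 0).foldl
    (fun acc p => if PySem.Str.startswith p.2 "epoch" then some p.1 else acc) none

-- ===== PRECONDITION & SPEC =====
def Spec_find_epoch_directory_index_py (directories : List String) (out : Option Int) : Prop := out = find_epoch_directory_index_py_alt directories
instance (directories : List String) (out : Option Int) : Decidable (Spec_find_epoch_directory_index_py directories out) := by unfold Spec_find_epoch_directory_index_py; infer_instance

-- ===== CLAIM (what is proved, stated in full; the proofs are below) =====
def Claim_equal_find_epoch_directory_index_py : Prop := ∀ (directories : List String), Dom_find_epoch_directory_index_py directories → Spec_find_epoch_directory_index_py directories (find_epoch_directory_index_py directories)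

-- ===== LEMMAS AND PROOFS =====

lemma find_epoch_loopA_append (directories : List String) (x : String) :
    ∀ k, k ≤ directories.length →
      find_epoch_loopA (directories ++ [x]) k = find_epoch_loopA directories k := by
  intro k
  induction k with
  | zero => intro _; rfl
  | succ k ih =>
    intro hk
    have hk' : k < directories.length := by omega
    simp [find_epoch_loopA, List.getD, List.getElem?_append_left hk', ih (by omega)]

lemma find_epoch_eq (directories : List String) :
    find_epoch_directory_index_py directories = find_epoch_directory_index_py_alt directories := by
  induction directories using List.reverseRecOn with
  | nil => rfl
  | append_singleton ds x ih =>
    have hA : find_epoch_directory_index_py (ds ++ [x]) =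
        (if PySem.Str.startswith x "epoch" then some (ds.length : Int)
         else find_epoch_directory_index_py ds) := by
      have hget : (ds ++ [x]).getD ds.length "" = x := by
        simp
      simp only [find_epoch_directory_index_py, List.length_append, List.length_cons,
        List.length_nil, find_epoch_loopA, hget]
      rw [find_epoch_loopA_append ds x ds.length (le_refl _)]
    have hB : find_epoch_directory_index_py_alt (ds ++ [x]) =
        (if PySem.Str.startswith x "epoch" then some (ds.length : Int)
         else find_epoch_directory_index_py_alt ds) := by
      simp only [find_epoch_directory_index_py_alt, PySem.List.enumerate_append,
        List.foldl_append]
      simp [PySem.List.enumerate]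
    rw [hA, hB, ih]

-- ===== VERDICT (by name: the statement is the Claim_ definition above) =====
theorem find_epoch_directory_index_py_spec : Claim_equal_find_epoch_directory_index_py := by
  intro ds _
  unfold Spec_find_epoch_directory_index_py
  exact find_epoch_eq ds
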